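-- pv_equiv track=rewrite | github.com/zhangxinfang520/suanfa | 剑指offer/001_整数除法.py | divide2
-- ===== SOURCE A (Python) =====
-- def divide2(a: int, b: int) -> int:
--     INT_MIN, INT_MAX = -2 ** 31, 2 ** 31 - 1
--     if a == INT_MIN and b == -1:
--         return INT_MAX
--
--     ans = 0
--
--     # 处理边界，防止转正数溢出
--     if b == INT_MIN:  # 除数绝对值最大，结果必为 0 或 1
--         return 1 if a == b else 0
--     if a == INT_MIN:  # 被除数先减去一个除数
--         a -= -abs(b)
--         ans += 1
--
--     sign = -1 if (a > 0) ^ (b > 0) else 1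
--
--     a, b = abs(a), abs(b)
--     for i in range(31, -1, -1):
--         if (a >> i) - b >= 0:
--             a = a - (b << i)
--             # 代码优化：这里控制 ans 大于等于 INT_MAX
--             if ans > INT_MAX - (1 << i):
--                 return INT_MIN
--             ans += 1 << i
--     # bug 修复：因为不能使用乘号，所以将乘号换成三目运算符
--     return ans if sign == 1 else -ans
-- ===== SOURCE B (Python) =====
-- def divide2(a: int, b: int) -> int:
--     INT_MIN, INT_MAX = -(1 << 31), (1 << 31) - 1
--     if a == INT_MIN and b == -1:
--         return INT_MAX
--     if b == INT_MIN:
--         return 1 if a == b else 0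
--     q = abs(a) // abs(b)  # truncated-toward-zero magnitude of the quotient
--     if q > INT_MAX:
--         return INT_MIN
--     return -q if (a > 0) != (b > 0) else q
-- ===== Notes on version B (the rewrite author's own statement) =====
-- stated objective: simpler
-- what changed: The 32-iteration bit scan with per-step overflow clamp is replaced by one arithmetic computation: q = abs(a)//abs(b), a single clamp q > INT_MAX -> INT_MIN, and the sign applied; the INT_MIN/-1 and b==INT_MIN shortcuts are kept.
-- outside the precondition, e.g. on divide2(5, 0): A returns -2147483648, B raises ZeroDivisionError
import Mathlib
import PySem

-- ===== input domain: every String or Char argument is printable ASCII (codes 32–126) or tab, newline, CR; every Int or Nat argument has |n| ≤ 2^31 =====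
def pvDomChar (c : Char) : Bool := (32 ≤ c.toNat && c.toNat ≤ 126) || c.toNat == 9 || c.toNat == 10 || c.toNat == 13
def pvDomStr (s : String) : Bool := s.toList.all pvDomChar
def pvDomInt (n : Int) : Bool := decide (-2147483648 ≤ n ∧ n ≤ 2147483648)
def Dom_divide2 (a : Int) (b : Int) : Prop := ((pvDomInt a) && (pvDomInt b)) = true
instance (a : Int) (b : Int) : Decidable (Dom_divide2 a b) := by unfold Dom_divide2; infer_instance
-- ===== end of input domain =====

-- B replaces A's fixed 32-iteration bit scan and per-step clamp by a single truncated
-- division on absolute values with one clamp; simpler. On b = 0, A returns a value but B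
-- raises ZeroDivisionError (outside Pre_).

-- ===== PORT A =====
-- sign = -1 if (a > 0) ^ (b > 0) else 1
def divide2_sign (a b : Int) : Int := if ((decide (0 < a)).xor (decide (0 < b))) then -1 else 1

-- for i in range(31, -1, -1): fuel n+1 means current index i = n
def divide2_scan (b : Int) : Nat → Int → Int → Option Int
  | 0, _a, ans => some ans
  | n+1, a, ans =>
    if 0 ≤ PySem.Int.floordiv a (2 ^ n) - b then   -- (a >> i) - b >= 0
      if 2147483647 - 2 ^ n < ans then none        -- ans > INT_MAX - (1 << i): return INT_MIN
      else divide2_scan b n (a - b * 2 ^ n) (ans + 2 ^ n)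
    else divide2_scan b n a ans

def divide2_finish (b a1 ans0 : Int) : Int :=
  match divide2_scan |b| 32 |a1| ans0 with
  | none => -2147483648
  | some ans => if divide2_sign a1 b = 1 then ans else -ans

def divide2 (a : Int) (b : Int) : Int :=
  if a = -2147483648 ∧ b = -1 then 2147483647
  else if b = -2147483648 then (if a = b then (1 : Int) else 0)
  else
    divide2_finish b
      (if a = -2147483648 then a - (-|b|) else a)   -- a -= -abs(b)
      (if a = -2147483648 then (0 : Int) + 1 else 0)  -- ans += 1

-- ===== PORT B =====
def divide2_alt (a : Int) (b : Int) : Int :=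
  if a = -2147483648 ∧ b = -1 then 2147483647
  else if b = -2147483648 then (if a = b then (1 : Int) else 0)
  else
    let q := PySem.Int.floordiv |a| |b|       -- abs(a) // abs(b); Python raises on b = 0 (outside Pre_)
    if 2147483647 < q then -2147483648
    else if (decide (0 < a)).xor (decide (0 < b)) then -q else q

-- ===== PRECONDITION & SPEC =====
-- Pre_ excludes b = 0, where A's INT_MIN return is an artefact of its overflow clamp and B,
-- like any natural division routine, raises ZeroDivisionError.
def Pre_divide2 (a : Int) (b : Int) : Prop := b ≠ 0
instance (a : Int) (b : Int) : Decidable (Pre_divide2 a b) := by unfold Pre_divide2; infer_instance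
def pvWitness_divide2 : Int × Int := (7, 2)
def Spec_divide2 (a : Int) (b : Int) (out : Int) : Prop := out = divide2_alt a b
instance (a : Int) (b : Int) (out : Int) : Decidable (Spec_divide2 a b out) := by unfold Spec_divide2; infer_instance

-- ===== CLAIM (what is proved, stated in full; the proofs are below) =====
def Claim_equal_divide2 : Prop := ∀ (a : Int) (b : Int), Dom_divide2 a b → Pre_divide2 a b → Spec_divide2 a b (divide2 a b)

-- ===== LEMMAS AND PROOFS =====

-- A's bit scan computes the floor quotient, clamping exactly when ans + a/b would exceed INT_MAX
theorem scan_closed (b : Int) (hb : 1 ≤ b) :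
    ∀ (n : Nat) (a ans : Int), 0 ≤ a → a < b * 2 ^ n → ans ≤ 2147483647 →
      divide2_scan b n a ans =
        if 2147483647 < ans + a / b then none else some (ans + a / b) := by
  intro n
  induction n with
  | zero =>
    intro a ans ha hlt hans
    have h0 : a / b = 0 := Int.ediv_eq_zero_of_lt ha (by simpa using hlt)
    simp only [divide2_scan, h0, add_zero]
    rw [if_neg (by omega)]
  | succ n ih =>
    intro a ans ha hlt hans
    have hpow : (0:Int) < 2 ^ n := by positivity
    have hcond : (0 ≤ PySem.Int.floordiv a (2 ^ n) - b) ↔ b * 2 ^ n ≤ a := by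
      rw [show (0 ≤ PySem.Int.floordiv a (2 ^ n) - b) ↔ b ≤ PySem.Int.floordiv a (2 ^ n) from by omega,
          PySem.Int.le_floordiv_iff_mul_le hpow]
    rw [divide2_scan]
    by_cases hge : b * 2 ^ n ≤ a
    · rw [if_pos (hcond.mpr hge)]
      have hq : 2 ^ n ≤ a / b := by
        rw [Int.le_ediv_iff_mul_le (by omega)]
        linarith [mul_comm b ((2:Int) ^ n)]
      by_cases hcl : 2147483647 - 2 ^ n < ans
      · rw [if_pos hcl, if_pos (by omega)]
      · rw [if_neg hcl]
        have hsub : (a - b * 2 ^ n) / b = a / b - 2 ^ n := by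
          have h' : a - b * 2 ^ n = a + (-(2 ^ n)) * b := by ring
          rw [h', Int.add_mul_ediv_right _ _ (by omega)]
          ring
        rw [ih (a - b * 2 ^ n) (ans + 2 ^ n) (by omega)
            (by have : b * 2 ^ (n + 1) = b * 2 ^ n + b * 2 ^ n := by ring
                omega)
            (by omega), hsub]
        have h'' : ans + 2 ^ n + (a / b - 2 ^ n) = ans + a / b := by ring
        rw [h'']
    · rw [if_neg (by rw [hcond]; exact hge)]
      exact ih a ans ha (by nlinarith) hans

-- A's post-preamble body in closed form
theorem finish_closed (b a1 ans0 : Int) (hb : 1 ≤ |b|) (hbd : |a1| < |b| * 2 ^ 32)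
    (hans : ans0 ≤ 2147483647) :
    divide2_finish b a1 ans0 =
      if 2147483647 < ans0 + |a1| / |b| then -2147483648
      else if ((decide (0 < a1)).xor (decide (0 < b))) = true then -(ans0 + |a1| / |b|)
      else ans0 + |a1| / |b| := by
  unfold divide2_finish divide2_sign
  rw [scan_closed |b| hb 32 |a1| ans0 (abs_nonneg a1) hbd hans]
  by_cases hcl : 2147483647 < ans0 + |a1| / |b|
  · rw [if_pos hcl, if_pos hcl]
  · rw [if_neg hcl, if_neg hcl]
    by_cases hx : ((decide (0 < a1)).xor (decide (0 < b))) = true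
    · rw [if_pos hx, if_pos hx]
      rfl
    · rw [if_neg hx, if_neg hx]
      rfl

-- ===== VERDICT (by name: the statement is the Claim_ definition above) =====
theorem divide2_spec : Claim_equal_divide2 := by
  intro a b hdom hpre
  have hdom' : ((-2147483648 ≤ a ∧ a ≤ 2147483648) ∧ (-2147483648 ≤ b ∧ b ≤ 2147483648)) := by
    simpa [Dom_divide2, pvDomInt, Bool.and_eq_true, decide_eq_true_iff] using hdom
  obtain ⟨⟨hA1, hA2⟩, hB1, hB2⟩ := hdom'
  have hb0 : b ≠ 0 := hpre
  unfold Spec_divide2 divide2 divide2_alt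
  by_cases h1 : a = -2147483648 ∧ b = -1
  · rw [if_pos h1, if_pos h1]
  · rw [if_neg h1, if_neg h1]
    by_cases h2 : b = -2147483648
    · rw [if_pos h2, if_pos h2]
    · rw [if_neg h2, if_neg h2]
      have hbpos : 1 ≤ |b| := by rcases abs_cases b with ⟨h, _⟩ | ⟨h, _⟩ <;> omega
      have hbub : |b| ≤ 2147483648 := by rcases abs_cases b with ⟨h, _⟩ | ⟨h, _⟩ <;> omega
      have hp32 : (2147483648 : Int) < 2 ^ 32 := by norm_num
      by_cases hamin : a = -2147483648
      · -- a == INT_MIN: A pre-subtracts one |b| and starts ans at 1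
        rw [if_pos hamin, if_pos hamin]
        subst hamin
        have habs1 : abs ((-2147483648 : Int) - -|b|) = 2147483648 - |b| := by
          rw [abs_of_nonpos (by omega)]; ring
        rw [finish_closed b ((-2147483648 : Int) - -|b|) (0 + 1) hbpos
            (by rw [habs1]; nlinarith) (by norm_num)]
        have hq : PySem.Int.floordiv |(-2147483648 : Int)| |b|
            = 0 + 1 + abs ((-2147483648 : Int) - -|b|) / |b| := by
          rw [PySem.Int.floordiv_eq_ediv_of_pos (by omega), habs1,
              show |(-2147483648 : Int)| = 2147483648 from by decide]
          have h := Int.add_mul_ediv_right (2147483648 - |b|) 1 (show |b| ≠ 0 by omega)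
          rw [show 2147483648 - |b| + 1 * |b| = (2147483648 : Int) by ring] at h
          omega
        have hs1 : decide (0 < (-2147483648 : Int) - -|b|) = false :=
          decide_eq_false (by omega)
        have hs2 : decide (0 < (-2147483648 : Int)) = false := by decide
        simp only [hq, hs1, hs2]
      · rw [if_neg hamin, if_neg hamin]
        have haub : |a| ≤ 2147483648 := by rcases abs_cases a with ⟨h, _⟩ | ⟨h, _⟩ <;> omega
        rw [finish_closed b a 0 hbpos (by nlinarith) (by norm_num)]
        have hq : PySem.Int.floordiv |a| |b| = 0 + |a| / |b| := by
          rw [PySem.Int.floordiv_eq_ediv_of_pos (by omega)]; ring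
        simp only [hq]
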